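-- pv_equiv track=rewrite | github.com/soyukke/lean-unsolved | scripts/syracuse_iter_general_mul.py | compute_C_k
-- ===== SOURCE A (Python) =====
-- def v2(n):
--     """2-adic valuation"""
--     if n == 0:
--         return 0
--     count = 0
--     while n % 2 == 0:
--         n //= 2
--         count += 1
--     return count
--
-- def syracuse(n):
--     """Syracuse function"""
--     m = 3 * n + 1
--     return m // (2 ** v2(m))
--
-- def compute_C_k(n, k):
--     """C_k(n) by recurrence: C_0=0, C_{k+1}=3*C_k+2^{S_k}"""
--     if k == 0:
--         return 0
--     # We compute iteratively
--     c = 0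
--     s = 0
--     cur = n
--     for i in range(k):
--         vi = v2(3 * cur + 1)
--         c = 3 * c + (2 ** s)  # C_{i+1} = 3*C_i + 2^{S_i}
--         s += vi  # S_{i+1} = S_i + v_i
--         cur = syracuse(cur)
--     return c
-- ===== SOURCE B (Python) =====
-- def v2(m):
--     """2-adic valuation, recursively"""
--     if m == 0 or m % 2 != 0:
--         return 0
--     return 1 + v2(m // 2)
--
-- def syracuse(n):
--     m = 3 * n + 1
--     return m // (2 ** v2(m))
--
-- def compute_C_k(n, k):
--     # pass 1: walk the trajectory, recording the running exponent sums S_0..S_{k-1}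
--     exps = []
--     s = 0
--     cur = n
--     for _ in range(k):
--         exps.append(s)
--         s += v2(3 * cur + 1)
--         cur = syracuse(cur)
--     # pass 2: closed-form power sum C_k = sum_i 3^(k-1-i) * 2^(S_i)
--     kk = len(exps)
--     return sum(3 ** (kk - 1 - i) * 2 ** e for i, e in enumerate(exps))
-- ===== Notes on version B (the rewrite author's own statement) =====
-- stated objective: alternative
-- what changed: B replaces the interleaved Horner recurrence c = 3*c + 2^S with two passes: it first materialises the list of running exponent sums S_0..S_{k-1} along the Syracuse trajectory, then evaluates the closed-form power sum C_k = sum_i 3^(k-1-i) * 2^(S_i); the 2-adic valuation is recursive instead of a while loop.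
import Mathlib
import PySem

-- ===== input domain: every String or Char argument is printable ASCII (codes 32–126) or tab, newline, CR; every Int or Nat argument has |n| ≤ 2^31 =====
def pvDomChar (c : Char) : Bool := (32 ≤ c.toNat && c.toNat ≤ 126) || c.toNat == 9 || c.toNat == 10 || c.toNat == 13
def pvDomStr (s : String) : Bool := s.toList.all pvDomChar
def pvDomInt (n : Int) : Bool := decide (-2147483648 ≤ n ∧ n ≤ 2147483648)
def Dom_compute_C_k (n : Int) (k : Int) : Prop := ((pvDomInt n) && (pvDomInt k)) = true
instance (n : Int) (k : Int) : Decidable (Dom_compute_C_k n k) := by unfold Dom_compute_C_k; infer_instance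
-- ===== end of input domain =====

-- B evaluates C_k as an explicit power sum over a materialised exponent list instead of A's
-- interleaved Horner recurrence; same cost, different decomposition (objective: alternative).

-- ===== PORT A =====
-- A's while loop of v2; the n = 0 guard only makes the recursion total (A never reaches it:
-- the loop is entered only with n ≠ 0, and an even nonzero n stays nonzero after //2).
def v2loopA (n : Int) (count : Int) : Int :=
  if n = 0 then count
  else if PySem.Int.mod n 2 = 0 then v2loopA (PySem.Int.floordiv n 2) (count + 1)
  else count
termination_by n.natAbs
decreasing_by
  rename_i h0 h2
  have he : n % 2 = 0 := by
    rw [← PySem.Int.mod_eq_emod_of_pos (a := n) (by omega : (0:Int) < 2)]; exact h2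
  have : PySem.Int.floordiv n 2 = n / 2 := PySem.Int.floordiv_eq_ediv_of_pos (by omega)
  rw [this]; omega

def v2A (n : Int) : Int := if n = 0 then 0 else v2loopA n 0

def syracuseA (n : Int) : Int :=
  let m := 3 * n + 1
  PySem.Int.floordiv m (2 ^ (v2A m).toNat)

def compute_C_k (n : Int) (k : Int) : Int :=
  if k = 0 then 0
  else
    ((PySem.List.pyRange 0 k 1).foldl
      (fun (st : Int × Int × Int) _ =>
        let vi := v2A (3 * st.2.2 + 1)
        (3 * st.1 + 2 ^ st.2.1.toNat, st.2.1 + vi, syracuseA st.2.2))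
      (0, 0, n)).1

-- ===== PORT B =====
-- recursive v2 (the m = 0 test is Source B's own base case)
def v2B (m : Int) : Int :=
  if m = 0 ∨ PySem.Int.mod m 2 ≠ 0 then 0
  else 1 + v2B (PySem.Int.floordiv m 2)
termination_by m.natAbs
decreasing_by
  rename_i h
  push Not at h
  have he : m % 2 = 0 := by
    rw [← PySem.Int.mod_eq_emod_of_pos (a := m) (by omega : (0:Int) < 2)]; exact h.2
  have : PySem.Int.floordiv m 2 = m / 2 := PySem.Int.floordiv_eq_ediv_of_pos (by omega)
  rw [this]; omega

def syracuseB (n : Int) : Int :=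
  let m := 3 * n + 1
  PySem.Int.floordiv m (2 ^ (v2B m).toNat)

-- pass 1 of Source B: the list [S_0, …, S_{t-1}] of running exponent sums
def buildExps : Nat → Int → Int → List Int
  | 0, _, _ => []
  | t + 1, s, cur => s :: buildExps t (s + v2B (3 * cur + 1)) (syracuseB cur)

def compute_C_k_alt (n : Int) (k : Int) : Int :=
  let exps := buildExps k.toNat 0 n
  let kk := exps.length
  (exps.zipIdx.map (fun p => 3 ^ (kk - 1 - p.2) * 2 ^ p.1.toNat)).sum

-- ===== PRECONDITION & SPEC =====
def Spec_compute_C_k (n : Int) (k : Int) (out : Int) : Prop := out = compute_C_k_alt n k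
instance (n : Int) (k : Int) (out : Int) : Decidable (Spec_compute_C_k n k out) := by unfold Spec_compute_C_k; infer_instance

-- ===== CLAIM (what is proved, stated in full; the proofs are below) =====
def Claim_equal_compute_C_k : Prop := ∀ (n : Int) (k : Int), Dom_compute_C_k n k → Spec_compute_C_k n k (compute_C_k n k)

-- ===== LEMMAS AND PROOFS =====

theorem v2loopA_eq_aux (N : Nat) : ∀ (n c : Int), n.natAbs ≤ N → v2loopA n c = c + v2B n := by
  induction N with
  | zero =>
      intro n c h
      have h0 : n = 0 := by omega
      subst h0
      rw [v2loopA.eq_def, v2B.eq_def]; simp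
  | succ N ih =>
      intro n c h
      by_cases h0 : n = 0
      · subst h0; rw [v2loopA.eq_def, v2B.eq_def]; simp
      · by_cases h2 : PySem.Int.mod n 2 = 0
        · have he : n % 2 = 0 := by
            rw [← PySem.Int.mod_eq_emod_of_pos (a := n) (by omega : (0:Int) < 2)]; exact h2
          have hdvd : (2:Int) ∣ n := by omega
          have hle : (n / 2).natAbs ≤ N := by omega
          rw [v2loopA.eq_def, v2B.eq_def]
          simp [h0, he]
          rw [ih _ _ hle]
          ring
        · have he : n % 2 ≠ 0 := by
            rw [← PySem.Int.mod_eq_emod_of_pos (a := n) (by omega : (0:Int) < 2)]; exact h2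
          have hm1 : n % 2 = 1 := by omega
          have hnd : ¬ (2:Int) ∣ n := by omega
          rw [v2loopA.eq_def, v2B.eq_def]
          simp [h0, hm1]

theorem v2loopA_eq (n c : Int) : v2loopA n c = c + v2B n :=
  v2loopA_eq_aux n.natAbs n c (le_refl _)

theorem v2_eq (n : Int) : v2A n = v2B n := by
  unfold v2A
  split
  · rename_i h; subst h; rw [v2B.eq_def]; simp
  · rw [v2loopA_eq]; simp

theorem syracuse_eq (n : Int) : syracuseA n = syracuseB n := by
  simp [syracuseA, syracuseB, v2_eq]

-- A's loop as a pure iteration on the step count (stated with B's helpers)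
def AiterC : Nat → Int → Int → Int → Int
  | 0, c, _, _ => c
  | t + 1, c, s, cur =>
      AiterC t (3 * c + 2 ^ s.toNat) (s + v2B (3 * cur + 1)) (syracuseB cur)

theorem foldA_eq (l : List Int) : ∀ (c s cur : Int),
    ((l.foldl
      (fun (st : Int × Int × Int) _ =>
        let vi := v2A (3 * st.2.2 + 1)
        (3 * st.1 + 2 ^ st.2.1.toNat, st.2.1 + vi, syracuseA st.2.2))
      (c, s, cur)).1) = AiterC l.length c s cur := by
  induction l with
  | nil => intro c s cur; simp [AiterC]
  | cons x xs ih =>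
      intro c s cur
      simp only [List.foldl_cons, List.length_cons]
      rw [ih]
      simp [AiterC, v2_eq, syracuse_eq]

theorem length_buildExps (t : Nat) : ∀ (s cur : Int), (buildExps t s cur).length = t := by
  induction t with
  | zero => intro s cur; simp [buildExps]
  | succ t ih => intro s cur; simp [buildExps, ih]

-- B's second pass as a function of the step count
def Psum (t : Nat) (s cur : Int) : Int :=
  ((buildExps t s cur).zipIdx.map (fun p => 3 ^ (t - 1 - p.2) * 2 ^ p.1.toNat)).sum

theorem sum_zipIdx_shift (kk : Nat) (l : List Int) : ∀ (j : Nat),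
    ((l.zipIdx (j + 1)).map (fun p => (3:Int) ^ (kk + 1 - 1 - p.2) * 2 ^ p.1.toNat)).sum
      = ((l.zipIdx j).map (fun p => (3:Int) ^ (kk - 1 - p.2) * 2 ^ p.1.toNat)).sum := by
  induction l with
  | nil => intro j; simp
  | cons x xs ih =>
      intro j
      simp only [List.zipIdx_cons, List.map_cons, List.sum_cons, ih (j + 1)]
      have h3 : kk + 1 - 1 - (j + 1) = kk - 1 - j := by omega
      rw [h3]

theorem Psum_succ (t : Nat) (s cur : Int) :
    Psum (t + 1) s cur
      = 3 ^ t * 2 ^ s.toNat + Psum t (s + v2B (3 * cur + 1)) (syracuseB cur) := by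
  unfold Psum
  simp only [buildExps, List.zipIdx_cons, List.map_cons, List.sum_cons]
  rw [sum_zipIdx_shift t _ 0]
  simp

theorem AiterC_eq (t : Nat) : ∀ (c s cur : Int),
    AiterC t c s cur = 3 ^ t * c + Psum t s cur := by
  induction t with
  | zero => intro c s cur; simp [AiterC, Psum, buildExps]
  | succ t ih =>
      intro c s cur
      rw [AiterC, ih, Psum_succ]
      ring

theorem alt_eq_Psum (n k : Int) : compute_C_k_alt n k = Psum k.toNat 0 n := by
  unfold compute_C_k_alt Psum
  simp [length_buildExps]

-- ===== VERDICT (by name: the statement is the Claim_ definition above) =====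
theorem compute_C_k_spec : Claim_equal_compute_C_k := by
  intro n k _
  unfold Spec_compute_C_k compute_C_k
  rw [alt_eq_Psum]
  split
  · rename_i h; subst h
    simp [Psum, buildExps]
  · rw [foldA_eq, AiterC_eq, PySem.List.length_pyRange_one]
    simp
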